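-- pv_equiv track=rewrite | github.com/ThomasDeb/AdventOfCode | 2024/advent22.py | new_secret_number
-- ===== SOURCE A (Python) =====
-- def new_secret_number(secret_number, n_steps):
--     bananas_prev = secret_number % 10
--     change = [0, 0, 0, 0]
--     sell_price = {}
--     for n in range(n_steps):
--         secret_number = ((secret_number * 64) ^ secret_number) % 16777216
--         secret_number = ((secret_number // 32) ^ secret_number) % 16777216
--         secret_number = ((secret_number * 2048) ^ secret_number) % 16777216
--         bananas = secret_number % 10
--         ch = bananas - bananas_prev
--         if n <= 3:
--             change[n] = ch
--             if n == 3: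
--                 sell_price[str(change)] = bananas
--         else:
--             change[:3] = change[1:]
--             change[3] = ch
--             if str(change) not in sell_price.keys():
--                 sell_price[str(change)] = bananas
--         bananas_prev = bananas
--     return sell_price
-- ===== SOURCE B (Python) =====
-- def new_secret_number(secret_number, n_steps):
--     # Pass 1: run the PRNG alone, collecting the banana price after each step.
--     prices = [secret_number % 10]
--     s = secret_number
--     for _ in range(n_steps):
--         s = ((s * 64) ^ s) % 16777216
--         s = ((s // 32) ^ s) % 16777216
--         s = ((s * 2048) ^ s) % 16777216
--         prices.append(s % 10)
--     # Pass 2: price deltas.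
--     changes = [prices[i + 1] - prices[i] for i in range(n_steps)]
--     # Pass 3: first occurrence of each 4-change window wins.
--     sell_price = {}
--     for n in range(3, n_steps):
--         key = str([changes[n - 3], changes[n - 2], changes[n - 1], changes[n]])
--         if key not in sell_price:
--             sell_price[key] = prices[n + 1]
--     return sell_price
-- ===== Notes on version B (the rewrite author's own statement) =====
-- stated objective: simpler
-- what changed: Replaces A's single loop that interleaves the PRNG with a mutated 4-slot sliding window and in-loop dict writes by three separate passes: build the full price list, derive the change list, then record the first price per 4-change window by plain indexing.
import Mathlib
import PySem

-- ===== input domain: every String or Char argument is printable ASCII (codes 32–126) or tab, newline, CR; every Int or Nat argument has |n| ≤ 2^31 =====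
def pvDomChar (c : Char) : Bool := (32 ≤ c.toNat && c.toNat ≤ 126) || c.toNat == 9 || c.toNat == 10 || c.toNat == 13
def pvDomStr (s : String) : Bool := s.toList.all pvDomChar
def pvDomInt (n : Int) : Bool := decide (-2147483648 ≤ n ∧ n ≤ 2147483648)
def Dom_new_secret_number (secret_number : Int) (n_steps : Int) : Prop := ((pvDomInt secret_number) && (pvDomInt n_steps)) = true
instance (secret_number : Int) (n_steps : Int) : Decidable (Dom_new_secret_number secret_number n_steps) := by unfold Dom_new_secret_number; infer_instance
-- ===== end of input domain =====

-- B replaces A's single loop (PRNG + mutated 4-slot window + in-loop dict writes) by three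
-- separate passes (price list, change list, first-occurrence scan); same values, simpler shape.

-- str(change) for a Python list of ints: "[a, b, c, d]" — exact for int lists (shared by both ports)
def pvKey (c : List Int) : String := "[" ++ PySem.Str.join ", " (c.map PySem.Int.toStr) ++ "]"

-- ===== PORT A =====
-- A's loop body as a named step function (same statements, same order)
def pvStepA (st : Int × Int × List Int × PySem.Dict String Int) (n : Int) :
    Int × Int × List Int × PySem.Dict String Int :=
  let s0 := st.1
  let s1 := PySem.Int.mod (PySem.Int.bxor (s0 * 64) s0) 16777216
  let s2 := PySem.Int.mod (PySem.Int.bxor (PySem.Int.floordiv s1 32) s1) 16777216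
  let s3 := PySem.Int.mod (PySem.Int.bxor (s2 * 2048) s2) 16777216
  let bananas := PySem.Int.mod s3 10
  let ch := bananas - st.2.1
  if n ≤ 3 then
    let change := PySem.List.pySetD st.2.2.1 n ch
    let sell := if n == 3 then st.2.2.2.insert (pvKey change) bananas else st.2.2.2
    (s3, bananas, change, sell)
  else
    -- change[:3] = change[1:] is ported as change[1:] ++ change[3:] (exact slice-assignment on a length-4 list)
    let change := PySem.List.slice st.2.2.1 (some 1) none ++ PySem.List.slice st.2.2.1 (some 3) none
    let change := PySem.List.pySetD change 3 ch
    let sell := if (st.2.2.2.contains (pvKey change)) then st.2.2.2 else st.2.2.2.insert (pvKey change) bananas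
    (s3, bananas, change, sell)

def new_secret_number (secret_number : Int) (n_steps : Int) : List (String × Int) :=
  let fin := (PySem.List.pyRange 0 n_steps 1).foldl pvStepA
    (secret_number, PySem.Int.mod secret_number 10, ([0, 0, 0, 0] : List Int), PySem.Dict.empty)
  fin.2.2.2.items

-- ===== PORT B =====
-- one PRNG transform (the three update lines of Source B's pass 1)
def pvNext (s : Int) : Int :=
  let s1 := PySem.Int.mod (PySem.Int.bxor (s * 64) s) 16777216
  let s2 := PySem.Int.mod (PySem.Int.bxor (PySem.Int.floordiv s1 32) s1) 16777216
  PySem.Int.mod (PySem.Int.bxor (s2 * 2048) s2) 16777216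

-- pass-1 body: prices.append(s % 10) with the advanced secret
def pvPriceStep (acc : List Int × Int) (_n : Int) : List Int × Int :=
  let s := pvNext acc.2
  (acc.1 ++ [PySem.Int.mod s 10], s)

-- pass-3 body: record prices[n+1] for the window changes[n-3..n] if the key is new
def pvSellStep (prices changes : List Int) (d : PySem.Dict String Int) (n : Int) : PySem.Dict String Int :=
  let key := pvKey [PySem.List.pyGetD changes (n - 3) 0, PySem.List.pyGetD changes (n - 2) 0,
                    PySem.List.pyGetD changes (n - 1) 0, PySem.List.pyGetD changes n 0]
  if d.contains key then d else d.insert key (PySem.List.pyGetD prices (n + 1) 0)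

def new_secret_number_alt (secret_number : Int) (n_steps : Int) : List (String × Int) :=
  let prices := ((PySem.List.pyRange 0 n_steps 1).foldl pvPriceStep
    ([PySem.Int.mod secret_number 10], secret_number)).1
  let changes := (PySem.List.pyRange 0 n_steps 1).map
    (fun i => PySem.List.pyGetD prices (i + 1) 0 - PySem.List.pyGetD prices i 0)
  let sell := (PySem.List.pyRange 3 n_steps 1).foldl (pvSellStep prices changes) PySem.Dict.empty
  sell.items

-- ===== PRECONDITION & SPEC =====
def Spec_new_secret_number (secret_number : Int) (n_steps : Int) (out : List (String × Int)) : Prop := out = new_secret_number_alt secret_number n_steps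
instance (secret_number : Int) (n_steps : Int) (out : List (String × Int)) : Decidable (Spec_new_secret_number secret_number n_steps out) := by unfold Spec_new_secret_number; infer_instance

-- ===== CLAIM (what is proved, stated in full; the proofs are below) =====
def Claim_equal_new_secret_number : Prop := ∀ (secret_number : Int) (n_steps : Int), Dom_new_secret_number secret_number n_steps → Spec_new_secret_number secret_number n_steps (new_secret_number secret_number n_steps)

-- ===== LEMMAS AND PROOFS =====

-- price after k PRNG steps, and the k-th change
def pvP (s : Int) (k : Nat) : Int := PySem.Int.mod (pvNext^[k] s) 10
def pvC (s : Int) (k : Nat) : Int := pvP s (k + 1) - pvP s k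
def pvPI (s : Int) (i : Int) : Int := pvP s i.toNat
def pvCI (s : Int) (i : Int) : Int := pvC s i.toNat

-- the canonical dict both programs build
def pvIns (s : Int) (d : PySem.Dict String Int) (n : Int) : PySem.Dict String Int :=
  let key := pvKey [pvCI s (n - 3), pvCI s (n - 2), pvCI s (n - 1), pvCI s n]
  if d.contains key then d else d.insert key (pvPI s (n + 1))

def pvDict (s : Int) (b : Int) : PySem.Dict String Int :=
  (PySem.List.pyRange 3 b 1).foldl (pvIns s) PySem.Dict.empty

-- A's sliding window after N iterations
def pvWin (s : Int) (N : Nat) : List Int :=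
  if N ≤ 4 then (List.range 4).map (fun i => if i < N then pvC s i else 0)
  else [pvC s (N - 4), pvC s (N - 3), pvC s (N - 2), pvC s (N - 1)]

lemma pvRange_toNat (a b : Int) (ha : 0 ≤ a) :
    PySem.List.pyRange a b 1 = PySem.List.pyRange a (b.toNat : Int) 1 := by
  rw [PySem.List.pyRange_one, PySem.List.pyRange_one]
  congr 2
  omega

lemma pvNext_iter_succ (s : Int) (N : Nat) : pvNext (pvNext^[N] s) = pvNext^[N + 1] s := by
  rw [Function.iterate_succ_apply']

lemma pvStepA_eq (st : Int × Int × List Int × PySem.Dict String Int) (n : Int) :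
    pvStepA st n =
      let s3 := pvNext st.1
      let bananas := PySem.Int.mod s3 10
      let ch := bananas - st.2.1
      if n ≤ 3 then
        let change := PySem.List.pySetD st.2.2.1 n ch
        (s3, bananas, change, if n == 3 then st.2.2.2.insert (pvKey change) bananas else st.2.2.2)
      else
        let change := PySem.List.pySetD (PySem.List.slice st.2.2.1 (some 1) none ++ PySem.List.slice st.2.2.1 (some 3) none) 3 ch
        (s3, bananas, change, if st.2.2.2.contains (pvKey change) then st.2.2.2 else st.2.2.2.insert (pvKey change) bananas) := by
  rfl

lemma pvStepA_le3 (s0 bp : Int) (chg : List Int) (d : PySem.Dict String Int) (n : Int) (h : n ≤ 3) :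
    pvStepA (s0, bp, chg, d) n =
      (pvNext s0, PySem.Int.mod (pvNext s0) 10,
       PySem.List.pySetD chg n (PySem.Int.mod (pvNext s0) 10 - bp),
       if n == 3 then d.insert (pvKey (PySem.List.pySetD chg n (PySem.Int.mod (pvNext s0) 10 - bp))) (PySem.Int.mod (pvNext s0) 10) else d) := by
  unfold pvStepA pvNext
  simp only [if_pos h]

lemma pvStepA_gt3 (s0 bp a b c e : Int) (d : PySem.Dict String Int) (n : Int) (h : ¬ n ≤ 3) :
    pvStepA (s0, bp, [a, b, c, e], d) n =
      (pvNext s0, PySem.Int.mod (pvNext s0) 10,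
       [b, c, e, PySem.Int.mod (pvNext s0) 10 - bp],
       if d.contains (pvKey [b, c, e, PySem.Int.mod (pvNext s0) 10 - bp]) then d
       else d.insert (pvKey [b, c, e, PySem.Int.mod (pvNext s0) 10 - bp]) (PySem.Int.mod (pvNext s0) 10)) := by
  unfold pvStepA pvNext
  simp only [if_neg h]
  rw [PySem.List.slice_from_one]
  rw [PySem.List.slice_from _ (by norm_num : (0:Int) ≤ 3)]
  simp [PySem.List.pySetD_of_nonneg]

lemma pvDict_le3 (s : Int) (b : Int) (h : b ≤ 3) : pvDict s b = PySem.Dict.empty := by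
  unfold pvDict
  rw [PySem.List.pyRange_one_eq_nil h]
  rfl

lemma pvDict_succ (s : Int) (b : Int) (h : 3 ≤ b) : pvDict s (b + 1) = pvIns s (pvDict s b) b := by
  unfold pvDict
  rw [PySem.List.pyRange_one_succ_right h, List.foldl_append]
  simp

-- A's loop invariant
lemma A_loop (s : Int) (N : Nat) :
    (PySem.List.pyRange 0 (N : Int) 1).foldl pvStepA
      (s, PySem.Int.mod s 10, ([0, 0, 0, 0] : List Int), PySem.Dict.empty)
      = (pvNext^[N] s, pvP s N, pvWin s N, pvDict s (N : Int)) := by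
  induction N with
  | zero =>
      simp [PySem.List.pyRange_one_eq_nil, pvP, pvWin, pvDict, List.range_succ]
  | succ N ih =>
      have hsplit : PySem.List.pyRange 0 ((N + 1 : Nat) : Int) 1
          = PySem.List.pyRange 0 (N : Int) 1 ++ [(N : Int)] := by
        push_cast
        exact PySem.List.pyRange_one_succ_right (by positivity)
      rw [hsplit, List.foldl_append, ih]
      simp only [List.foldl_cons, List.foldl_nil]
      match N with
      | 0 =>
          rw [pvStepA_eq]
          norm_num [pvWin, pvP, pvC, pvNext_iter_succ, List.range_succ]
          constructor
          · simp [PySem.List.pySetD_of_nonneg]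
          · rw [pvDict_le3 s 0 (by norm_num), pvDict_le3 s 1 (by norm_num)]
      | 1 =>
          rw [pvStepA_eq]
          norm_num [pvWin, pvP, pvC, pvNext_iter_succ, List.range_succ]
          constructor
          · simp [PySem.List.pySetD_of_nonneg]
          · rw [pvDict_le3 s 1 (by norm_num), pvDict_le3 s 2 (by norm_num)]
      | 2 =>
          rw [pvStepA_eq]
          norm_num [pvWin, pvP, pvC, pvNext_iter_succ, List.range_succ]
          constructor
          · simp [PySem.List.pySetD_of_nonneg]
          · rw [pvDict_le3 s 2 (by norm_num), pvDict_le3 s 3 (by norm_num)]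
      | 3 =>
          have hwin3 : pvWin s 3 = [pvC s 0, pvC s 1, pvC s 2, 0] := by
            norm_num [pvWin, List.range_succ]
          have hwin4 : pvWin s 4 = [pvC s 0, pvC s 1, pvC s 2, pvC s 3] := by
            norm_num [pvWin, List.range_succ]
          have hd : pvDict s 4 = pvIns s PySem.Dict.empty 3 := by
            rw [show ((4:Int)) = 3 + 1 by norm_num, pvDict_succ s 3 (by norm_num),
              pvDict_le3 s 3 (by norm_num)]
          rw [hwin3, pvStepA_le3 _ _ _ _ _ (by norm_num)]
          push_cast
          rw [hd, hwin4]
          have hch : PySem.Int.mod (pvNext (pvNext^[3] s)) 10 - pvP s 3 = pvC s 3 := by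
            rw [pvC, pvP, pvP, pvNext_iter_succ]
          rw [hch]
          have hset : PySem.List.pySetD [pvC s 0, pvC s 1, pvC s 2, 0] 3 (pvC s 3)
              = [pvC s 0, pvC s 1, pvC s 2, pvC s 3] := by
            simp [PySem.List.pySetD_of_nonneg]
          rw [hset]
          simp [pvIns, pvCI, pvPI, pvP, pvC, pvDict_le3 s 3 (by norm_num)]
      | (M + 4) =>
          have hwin : pvWin s (M + 4) = [pvC s M, pvC s (M + 1), pvC s (M + 2), pvC s (M + 3)] := by
            rcases M with _ | K
            · norm_num [pvWin, List.range_succ]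
            · have h : ¬ (K + 1 + 4 ≤ 4) := by omega
              rw [pvWin, if_neg h]
              simp only [show K + 1 + 4 - 4 = K + 1 from by omega,
                show K + 1 + 4 - 3 = K + 1 + 1 from by omega,
                show K + 1 + 4 - 2 = K + 1 + 2 from by omega,
                show K + 1 + 4 - 1 = K + 1 + 3 from by omega]
          have hwin' : pvWin s (M + 4 + 1) = [pvC s (M + 1), pvC s (M + 2), pvC s (M + 3), pvC s (M + 4)] := by
            have h : ¬ (M + 4 + 1 ≤ 4) := by omega
            rw [pvWin, if_neg h]
            simp only [show M + 4 + 1 - 4 = M + 1 from by omega,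
              show M + 4 + 1 - 3 = M + 2 from by omega,
              show M + 4 + 1 - 2 = M + 3 from by omega,
              show M + 4 + 1 - 1 = M + 4 from by omega]
          rw [hwin, pvStepA_gt3 _ _ _ _ _ _ _ _ (by push_cast; omega)]
          push_cast
          have hdict : pvDict s ((M : Int) + 4 + 1) = pvIns s (pvDict s ((M : Int) + 4)) ((M : Int) + 4) :=
            pvDict_succ s _ (by omega)
          rw [hdict, hwin']
          have hch : PySem.Int.mod (pvNext (pvNext^[M + 4] s)) 10 - pvP s (M + 4) = pvC s (M + 4) := by
            rw [pvC, pvP, pvP, pvNext_iter_succ]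
          rw [hch]
          have h1 : ((M : Int) + 4 - 3).toNat = M + 1 := by omega
          have h2 : ((M : Int) + 4 - 2).toNat = M + 2 := by omega
          have h3 : ((M : Int) + 4 - 1).toNat = M + 3 := by omega
          have h4 : ((M : Int) + 4).toNat = M + 4 := by omega
          have h5 : ((M : Int) + 4 + 1).toNat = M + 5 := by omega
          simp only [pvIns, pvCI, pvPI, h1, h2, h3, h4, h5]
          simp [pvNext_iter_succ, pvP, pvC, show M + 5 = M + 4 + 1 by omega]

-- B's price-list loop
lemma B_prices (s : Int) (N : Nat) :
    (PySem.List.pyRange 0 (N : Int) 1).foldl pvPriceStep ([PySem.Int.mod s 10], s)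
      = ((PySem.List.pyRange 0 ((N : Int) + 1) 1).map (pvPI s), pvNext^[N] s) := by
  induction N with
  | zero =>
      rw [PySem.List.pyRange_one_eq_nil (by norm_num)]
      simp [PySem.List.pyRange_one, pvPI, pvP]
  | succ N ih =>
      have hsplit : PySem.List.pyRange 0 ((N + 1 : Nat) : Int) 1
          = PySem.List.pyRange 0 (N : Int) 1 ++ [(N : Int)] := by
        push_cast
        exact PySem.List.pyRange_one_succ_right (by positivity)
      rw [hsplit, List.foldl_append, ih]
      simp only [List.foldl_cons, List.foldl_nil]
      unfold pvPriceStep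
      have hsplit2 : PySem.List.pyRange 0 ((N : Int) + 1 + 1) 1
          = PySem.List.pyRange 0 ((N : Int) + 1) 1 ++ [(N : Int) + 1] := by
        exact PySem.List.pyRange_one_succ_right (by positivity)
      push_cast
      rw [hsplit2, List.map_append]
      simp [pvPI, pvP, pvNext_iter_succ]

theorem A_eq_dict (s n : Int) : new_secret_number s n = (pvDict s ((n.toNat : Nat) : Int)).items := by
  simp only [new_secret_number]
  rw [pvRange_toNat 0 n (by norm_num), A_loop]

theorem B_eq_dict (s n : Int) : new_secret_number_alt s n = (pvDict s ((n.toNat : Nat) : Int)).items := by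
  simp only [new_secret_number_alt]
  rw [pvRange_toNat 0 n (by norm_num), pvRange_toNat 3 n (by norm_num), B_prices]
  apply congrArg PySem.Dict.items
  have hchg : (PySem.List.pyRange 0 ((n.toNat : Nat) : Int) 1).map
      (fun i => PySem.List.pyGetD ((PySem.List.pyRange 0 (((n.toNat : Nat) : Int) + 1) 1).map (pvPI s), pvNext^[n.toNat] s).1 (i + 1) 0
        - PySem.List.pyGetD ((PySem.List.pyRange 0 (((n.toNat : Nat) : Int) + 1) 1).map (pvPI s), pvNext^[n.toNat] s).1 i 0)
      = (PySem.List.pyRange 0 ((n.toNat : Nat) : Int) 1).map (pvCI s) := by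
    apply List.map_congr_left
    intro i hi
    rw [PySem.List.mem_pyRange_one] at hi
    show PySem.List.pyGetD ((PySem.List.pyRange 0 (((n.toNat : Nat) : Int) + 1) 1).map (pvPI s)) (i + 1) 0
        - PySem.List.pyGetD ((PySem.List.pyRange 0 (((n.toNat : Nat) : Int) + 1) 1).map (pvPI s)) i 0 = pvCI s i
    rw [PySem.List.pyGetD_map_pyRange_of_nonneg _ _ _ _ (by omega) (by omega),
        PySem.List.pyGetD_map_pyRange_of_nonneg _ _ _ _ (by omega) (by omega)]
    unfold pvCI pvC pvPI
    rw [show (i + 1).toNat = i.toNat + 1 from by omega]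
  rw [hchg]
  apply PySem.List.foldl_congr_mem
  intro d m hm
  rw [PySem.List.mem_pyRange_one] at hm
  unfold pvSellStep pvIns
  rw [PySem.List.pyGetD_map_pyRange_of_nonneg _ _ _ _ (by omega) (by omega),
      PySem.List.pyGetD_map_pyRange_of_nonneg _ _ _ _ (by omega) (by omega),
      PySem.List.pyGetD_map_pyRange_of_nonneg _ _ _ _ (by omega) (by omega),
      PySem.List.pyGetD_map_pyRange_of_nonneg _ _ _ _ (by omega) (by omega)]
  show (if d.contains (pvKey [pvCI s (m - 3), pvCI s (m - 2), pvCI s (m - 1), pvCI s m]) then d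
      else d.insert (pvKey [pvCI s (m - 3), pvCI s (m - 2), pvCI s (m - 1), pvCI s m])
        (PySem.List.pyGetD ((PySem.List.pyRange 0 (((n.toNat : Nat) : Int) + 1) 1).map (pvPI s)) (m + 1) 0)) = _
  rw [PySem.List.pyGetD_map_pyRange_of_nonneg _ _ _ _ (by omega) (by omega)]

-- ===== VERDICT (by name: the statement is the Claim_ definition above) =====
theorem new_secret_number_spec : Claim_equal_new_secret_number := by
  intro s n _
  unfold Spec_new_secret_number
  rw [A_eq_dict s n, B_eq_dict s n]
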